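-- pv_equiv track=rewrite | github.com/Razmik-Kutinava/SmartCRM | backend/tests/test_search.py | _check_no_snippet_dupes
-- ===== SOURCE A (Python) =====
-- def _check_no_snippet_dupes(results: list) -> bool:
--     seen = set()
--     for r in results:
--         key = r.get("snippet", "")[:80].lower().strip()
--         if not key:
--             continue
--         if key in seen:
--             return False
--         seen.add(key)
--     return True
-- ===== SOURCE B (Python) =====
-- def _check_no_snippet_dupes(results: list) -> bool:
--     keys = sorted(k for r in results if (k := r.get("snippet", "")[:80].lower().strip()))
--     return all(a != b for a, b in zip(keys, keys[1:]))
-- ===== Notes on version B (the rewrite author's own statement) =====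
-- stated objective: alternative
-- what changed: Replaces A's incremental seen-set with early return by collecting the non-empty normalized keys, sorting them, and scanning adjacent pairs for equality (sort-then-scan duplicate detection instead of hash-set membership).
import Mathlib
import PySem

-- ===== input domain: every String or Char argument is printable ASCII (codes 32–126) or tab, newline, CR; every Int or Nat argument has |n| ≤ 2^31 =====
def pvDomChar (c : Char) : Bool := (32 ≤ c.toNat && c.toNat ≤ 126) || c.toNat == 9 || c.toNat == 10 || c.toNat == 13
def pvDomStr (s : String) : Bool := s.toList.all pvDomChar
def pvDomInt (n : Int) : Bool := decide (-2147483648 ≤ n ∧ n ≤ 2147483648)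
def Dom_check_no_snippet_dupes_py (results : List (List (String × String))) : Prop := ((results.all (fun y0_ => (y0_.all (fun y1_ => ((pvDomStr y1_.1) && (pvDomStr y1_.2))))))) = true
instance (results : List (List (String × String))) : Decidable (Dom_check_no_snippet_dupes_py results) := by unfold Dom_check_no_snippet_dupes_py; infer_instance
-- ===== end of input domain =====

-- B detects duplicates by sorting the non-empty normalized keys and scanning adjacent pairs,
-- instead of A's incremental seen-set with early return (objective: alternative algorithm).

-- shared normalization chain of both Pythons: r.get("snippet", "")[:80].lower().strip()
def pvKeyOf (r : List (String × String)) : String :=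
  PySem.Str.strip (PySem.Str.lower (PySem.Str.slice ((PySem.Dict.mk r).getD "snippet" "") none (some 80)))

-- ===== PORT A =====
def pvGoA : List (List (String × String)) → PySem.Set String → Bool
  | [], _ => true
  | r :: rest, seen =>
    let key := pvKeyOf r
    if key = "" then pvGoA rest seen
    else if PySem.Set.contains seen key then false
    else pvGoA rest (PySem.Set.add seen key)

def check_no_snippet_dupes_py (results : List (List (String × String))) : Bool :=
  pvGoA results PySem.Set.empty

-- ===== PORT B =====
-- the generator: (k for r in results if (k := …)), then sorted(…)
def pvKeysB (results : List (List (String × String))) : List String :=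
  PySem.List.sorted ((results.map pvKeyOf).filter (fun k => k != "")) (fun x => x) false

-- all(a != b for a, b in zip(keys, keys[1:]))
def check_no_snippet_dupes_py_alt (results : List (List (String × String))) : Bool :=
  let keys := pvKeysB results
  (keys.zip (PySem.List.slice keys (some 1) none)).all (fun p => p.1 != p.2)

-- ===== PRECONDITION & SPEC =====
def Spec_check_no_snippet_dupes_py (results : List (List (String × String))) (out : Bool) : Prop := out = check_no_snippet_dupes_py_alt results
instance (results : List (List (String × String))) (out : Bool) : Decidable (Spec_check_no_snippet_dupes_py results out) := by unfold Spec_check_no_snippet_dupes_py; infer_instance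

-- ===== CLAIM (what is proved, stated in full; the proofs are below) =====
def Claim_equal_check_no_snippet_dupes_py : Prop := ∀ (results : List (List (String × String))), Dom_check_no_snippet_dupes_py results → Spec_check_no_snippet_dupes_py results (check_no_snippet_dupes_py results)

-- ===== LEMMAS AND PROOFS =====

-- the raw (unsorted) key list
def pvRawKeys (results : List (List (String × String))) : List String :=
  (results.map pvKeyOf).filter (fun k => k != "")

theorem pv_rawKeys_nil : pvRawKeys [] = [] := rfl

theorem pv_rawKeys_cons_skip {r : List (String × String)} (rest : List (List (String × String)))
    (hk : pvKeyOf r = "") : pvRawKeys (r :: rest) = pvRawKeys rest := by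
  simp [pvRawKeys, hk]

theorem pv_rawKeys_cons {r : List (String × String)} (rest : List (List (String × String)))
    (hk : pvKeyOf r ≠ "") : pvRawKeys (r :: rest) = pvKeyOf r :: pvRawKeys rest := by
  simp [pvRawKeys, hk]

theorem pv_add_of_not_mem {s : List String} {x : String} (h : x ∉ s) :
    PySem.Set.add s x = s ++ [x] := by
  simp [PySem.Set.add]; exact h

-- A's loop returns true iff the raw key list is duplicate-free and disjoint from `seen`
theorem pv_goA_iff (results : List (List (String × String))) : ∀ seen : List String,
    (pvGoA results seen = true ↔
      (pvRawKeys results).Nodup ∧ ∀ k ∈ pvRawKeys results, k ∉ seen) := by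
  induction results with
  | nil => intro seen; simp [pvGoA, pv_rawKeys_nil]
  | cons r rest ih =>
    intro seen
    by_cases hk : pvKeyOf r = ""
    · rw [pv_rawKeys_cons_skip rest hk]
      simpa [pvGoA, hk] using ih seen
    · rw [pv_rawKeys_cons rest hk, List.nodup_cons]
      by_cases hs : pvKeyOf r ∈ seen
      · have hcs : PySem.Set.contains seen (pvKeyOf r) = true :=
          (PySem.Set.contains_iff _ _).mpr hs
        simp only [pvGoA, if_neg hk, hcs, if_true]
        constructor
        · intro h; exact absurd h (by simp)
        · rintro ⟨-, hall⟩; exact absurd hs (hall (pvKeyOf r) (by simp))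
      · have hcs : PySem.Set.contains seen (pvKeyOf r) = false := by
          rw [← Bool.not_eq_true, PySem.Set.contains_iff]; exact hs
        simp only [pvGoA, if_neg hk, hcs, Bool.false_eq_true, if_false,
          pv_add_of_not_mem hs, ih (seen ++ [pvKeyOf r])]
        constructor
        · rintro ⟨hnd, hall⟩
          refine ⟨⟨fun hmem => ?_, hnd⟩, ?_⟩
          · exact (hall _ hmem) (by simp)
          · intro k hkm
            rcases List.mem_cons.mp hkm with rfl | hkm
            · exact hs
            · exact fun hks => (hall k hkm) (List.mem_append_left _ hks)
        · rintro ⟨⟨hxx, hnd⟩, hall⟩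
          refine ⟨hnd, fun k hkm habs => ?_⟩
          rcases List.mem_append.mp habs with h | h
          · exact hall k (List.mem_cons_of_mem _ hkm) h
          · rw [List.mem_singleton] at h; subst h; exact hxx hkm

-- adjacent-pair scan: on a (≤)-sorted list, "no adjacent equal" ↔ Nodup
theorem pv_adj_iff_nodup : ∀ l : List String, l.Pairwise (· ≤ ·) →
    ((l.zip l.tail).all (fun p => p.1 != p.2) = true ↔ l.Nodup) := by
  intro l
  induction l with
  | nil => simp
  | cons a t ih =>
    intro hp
    rcases List.pairwise_cons.mp hp with ⟨hle, hpt⟩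
    cases t with
    | nil => simp
    | cons b u =>
      rcases List.pairwise_cons.mp hpt with ⟨hleb, -⟩
      have hiht := ih hpt
      simp only [List.tail_cons, List.zip_cons_cons, List.all_cons, Bool.and_eq_true,
        bne_iff_ne, ne_eq, List.nodup_cons] at hiht ⊢
      constructor
      · rintro ⟨hab, hrest⟩
        have hnd := hiht.mp hrest
        refine ⟨?_, hnd⟩
        intro hmem
        rcases List.mem_cons.mp hmem with rfl | hmem
        · exact hab rfl
        · -- a ∈ u: a ≤ b ≤ a forces a = b, contradiction with hab
          have h1 : a ≤ b := hle b (by simp)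
          have h2 : b ≤ a := hleb a hmem
          exact hab (le_antisymm h1 h2)
      · rintro ⟨hnm, hnd⟩
        exact ⟨fun h => hnm (h ▸ List.mem_cons_self), hiht.mpr hnd⟩

theorem pv_alt_iff_nodup (results : List (List (String × String))) :
    check_no_snippet_dupes_py_alt results = true ↔ (pvRawKeys results).Nodup := by
  have hperm : (pvKeysB results).Perm (pvRawKeys results) :=
    PySem.List.sorted_perm _ _ _
  have hpw : (pvKeysB results).Pairwise (· ≤ ·) := by
    simpa using PySem.List.sorted_pairwise
      ((results.map pvKeyOf).filter (fun k => k != "")) (fun x => x)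
  have hslice : PySem.List.slice (pvKeysB results) (some 1) none = (pvKeysB results).tail := by
    simp [PySem.List.slice_from, List.drop_one]
  rw [check_no_snippet_dupes_py_alt]
  simp only [hslice]
  rw [pv_adj_iff_nodup _ hpw]
  exact hperm.nodup_iff

-- ===== VERDICT (by name: the statement is the Claim_ definition above) =====
theorem check_no_snippet_dupes_py_spec : Claim_equal_check_no_snippet_dupes_py := by
  intro results _
  unfold Spec_check_no_snippet_dupes_py check_no_snippet_dupes_py
  have hA := pv_goA_iff results PySem.Set.empty
  simp only [PySem.Set.empty, List.not_mem_nil, not_false_iff, imp_true_iff, and_true] at hA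
  have hB := pv_alt_iff_nodup results
  rw [show (PySem.Set.empty : PySem.Set String) = ([] : List String) from rfl]
  cases h1 : pvGoA results [] <;>
    cases h2 : check_no_snippet_dupes_py_alt results <;> simp_all
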